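-- pv_equiv track=rewrite | github.com/gabriellagziel/appoint | scripts/translate_missing_keys.py | categorize_missing_keys
-- ===== SOURCE A (Python) =====
-- from typing import Dict, List, Set
--
-- def categorize_missing_keys(missing_keys: List[str]) -> Dict[str, List[str]]:
--     """Categorize missing keys by type"""
--     categories = {
--         'user_facing': [],
--         'business_facing': [],
--         'common_ui': [],
--         'other': []
--     }
--
--     business_terms = ['studio', 'business', 'provider', 'billing', 'subscription', 'client', 'service']
--     user_terms = ['profile', 'family', 'child', 'reward', 'referral', 'booking', 'appointment', 'calendar']
--     ui_terms = ['button', 'screen', 'title', 'label', 'message', 'welcome', 'home', 'settings']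
--
--     for key in missing_keys:
--         key_lower = key.lower()
--
--         if any(term in key_lower for term in business_terms):
--             categories['business_facing'].append(key)
--         elif any(term in key_lower for term in user_terms):
--             categories['user_facing'].append(key)
--         elif any(term in key_lower for term in ui_terms):
--             categories['common_ui'].append(key)
--         else:
--             categories['other'].append(key)
--
--     return categories
-- ===== SOURCE B (Python) =====
-- from typing import Dict, List
--
-- def categorize_missing_keys(missing_keys: List[str]) -> Dict[str, List[str]]:
--     """Categorize missing keys by type"""
--     business_terms = ['studio', 'business', 'provider', 'billing', 'subscription', 'client', 'service']
--     user_terms = ['profile', 'family', 'child', 'reward', 'referral', 'booking', 'appointment', 'calendar']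
--     ui_terms = ['button', 'screen', 'title', 'label', 'message', 'welcome', 'home', 'settings']
--     defs = [('business_facing', business_terms),
--             ('user_facing', user_terms),
--             ('common_ui', ui_terms)]
--
--     def category(key: str) -> str:
--         key_lower = key.lower()
--         for name, terms in defs:
--             if any(term in key_lower for term in terms):
--                 return name
--         return 'other'
--
--     return {name: [k for k in missing_keys if category(k) == name]
--             for name in ('user_facing', 'business_facing', 'common_ui', 'other')}
-- ===== Notes on version B (the rewrite author's own statement) =====
-- stated objective: simpler
-- what changed: Replaces the dict-of-buckets with per-key appends and an if/elif chain by a pure classifier function (first-match over a data-driven list of category definitions) plus one filter comprehension per category building the result dict directly.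
import Mathlib
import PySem

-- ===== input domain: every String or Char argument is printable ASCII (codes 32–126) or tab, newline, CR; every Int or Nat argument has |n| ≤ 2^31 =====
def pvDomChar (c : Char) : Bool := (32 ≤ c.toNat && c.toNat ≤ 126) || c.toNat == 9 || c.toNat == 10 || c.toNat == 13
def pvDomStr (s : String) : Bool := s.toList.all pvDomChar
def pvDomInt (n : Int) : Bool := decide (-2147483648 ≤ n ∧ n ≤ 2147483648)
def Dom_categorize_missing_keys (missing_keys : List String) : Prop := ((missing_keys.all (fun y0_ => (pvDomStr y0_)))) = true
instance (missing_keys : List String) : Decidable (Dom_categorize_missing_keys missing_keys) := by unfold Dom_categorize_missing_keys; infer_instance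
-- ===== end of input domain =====

-- B replaces A's dict-of-buckets with per-key appends by a pure first-match classifier over
-- a data-driven category list plus one filter per category (objective: simpler).


-- ===== PORT A =====
def pvBusinessTerms : List String := ["studio", "business", "provider", "billing", "subscription", "client", "service"]
def pvUserTerms : List String := ["profile", "family", "child", "reward", "referral", "booking", "appointment", "calendar"]
def pvUiTerms : List String := ["button", "screen", "title", "label", "message", "welcome", "home", "settings"]

-- the body of A's for-loop, kept as a helper (categories['x'].append(key) = modify "x" [] (· ++ [key]))
def pvStepA (cats : PySem.Dict String (List String)) (key : String) : PySem.Dict String (List String) :=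
  let key_lower := PySem.Str.lower key
  if pvBusinessTerms.any (fun term => PySem.Str.isIn term key_lower) then
    cats.modify "business_facing" [] (fun l => l ++ [key])
  else if pvUserTerms.any (fun term => PySem.Str.isIn term key_lower) then
    cats.modify "user_facing" [] (fun l => l ++ [key])
  else if pvUiTerms.any (fun term => PySem.Str.isIn term key_lower) then
    cats.modify "common_ui" [] (fun l => l ++ [key])
  else
    cats.modify "other" [] (fun l => l ++ [key])

def categorize_missing_keys (missing_keys : List String) : List (String × List String) :=
  let categories : PySem.Dict String (List String) :=
    PySem.Dict.mk [("user_facing", []), ("business_facing", []), ("common_ui", []), ("other", [])]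
  (missing_keys.foldl pvStepA categories).items

-- ===== PORT B =====
def pvDefs : List (String × List String) :=
  [("business_facing", pvBusinessTerms), ("user_facing", pvUserTerms), ("common_ui", pvUiTerms)]

-- Source B's 'category': first matching (name, terms) pair wins, else 'other'
def pvCategory (key : String) : String :=
  let key_lower := PySem.Str.lower key
  match pvDefs.find? (fun d => d.2.any (fun term => PySem.Str.isIn term key_lower)) with
  | some d => d.1
  | none => "other"

def categorize_missing_keys_alt (missing_keys : List String) : List (String × List String) :=
  ["user_facing", "business_facing", "common_ui", "other"].map
    (fun name => (name, missing_keys.filter (fun k => pvCategory k == name)))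

-- ===== PRECONDITION & SPEC =====
def Spec_categorize_missing_keys (missing_keys : List String) (out : List (String × List String)) : Prop := out = categorize_missing_keys_alt missing_keys
instance (missing_keys : List String) (out : List (String × List String)) : Decidable (Spec_categorize_missing_keys missing_keys out) := by unfold Spec_categorize_missing_keys; infer_instance

-- ===== CLAIM (what is proved, stated in full; the proofs are below) =====
def Claim_equal_categorize_missing_keys : Prop := ∀ (missing_keys : List String), Dom_categorize_missing_keys missing_keys → Spec_categorize_missing_keys missing_keys (categorize_missing_keys missing_keys)

-- ===== LEMMAS AND PROOFS =====

-- the fold over A's four-bucket dict appends, bucket by bucket, exactly B's filters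
theorem pvFold_items (ks : List String) (u b c o : List String) :
    ((ks.foldl pvStepA (PySem.Dict.mk
        [("user_facing", u), ("business_facing", b), ("common_ui", c), ("other", o)])).items)
    = [("user_facing", u ++ ks.filter (fun k => pvCategory k == "user_facing")),
       ("business_facing", b ++ ks.filter (fun k => pvCategory k == "business_facing")),
       ("common_ui", c ++ ks.filter (fun k => pvCategory k == "common_ui")),
       ("other", o ++ ks.filter (fun k => pvCategory k == "other"))] := by
  induction ks generalizing u b c o with
  | nil => simp [PySem.Dict.items]
  | cons k ks ih =>
    simp only [List.foldl_cons, List.filter_cons]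
    by_cases hb : (pvBusinessTerms.any fun term => PySem.Chars.isIn term.toList (PySem.Chars.lower k.toList)) = true
    · have hcat : pvCategory k = "business_facing" := by
        simp [pvCategory, pvDefs, List.find?, hb]
      rw [show pvStepA (PySem.Dict.mk [("user_facing", u), ("business_facing", b), ("common_ui", c), ("other", o)]) k
            = PySem.Dict.mk [("user_facing", u), ("business_facing", b ++ [k]), ("common_ui", c), ("other", o)] by
        simp [pvStepA, List.any_eq_true.mp hb, PySem.Dict.modify, PySem.Dict.getD, PySem.Dict.get?, PySem.Dict.contains, PySem.Dict.insert]]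
      rw [ih]
      simp [hcat]
    · by_cases hu : (pvUserTerms.any fun term => PySem.Chars.isIn term.toList (PySem.Chars.lower k.toList)) = true
      · have hcat : pvCategory k = "user_facing" := by
          simp [pvCategory, pvDefs, List.find?, hb, hu]
        rw [show pvStepA (PySem.Dict.mk [("user_facing", u), ("business_facing", b), ("common_ui", c), ("other", o)]) k
              = PySem.Dict.mk [("user_facing", u ++ [k]), ("business_facing", b), ("common_ui", c), ("other", o)] by
          simp [pvStepA, (List.any_eq_true.not.mp hb), List.any_eq_true.mp hu, PySem.Dict.modify, PySem.Dict.getD, PySem.Dict.get?, PySem.Dict.contains, PySem.Dict.insert]]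
        rw [ih]
        simp [hcat]
      · by_cases hc : (pvUiTerms.any fun term => PySem.Chars.isIn term.toList (PySem.Chars.lower k.toList)) = true
        · have hcat : pvCategory k = "common_ui" := by
            simp [pvCategory, pvDefs, List.find?, hb, hu, hc]
          rw [show pvStepA (PySem.Dict.mk [("user_facing", u), ("business_facing", b), ("common_ui", c), ("other", o)]) k
                = PySem.Dict.mk [("user_facing", u), ("business_facing", b), ("common_ui", c ++ [k]), ("other", o)] by
            simp [pvStepA, (List.any_eq_true.not.mp hb), (List.any_eq_true.not.mp hu), List.any_eq_true.mp hc, PySem.Dict.modify, PySem.Dict.getD, PySem.Dict.get?, PySem.Dict.contains, PySem.Dict.insert]]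
          rw [ih]
          simp [hcat]
        · have hcat : pvCategory k = "other" := by
            simp [pvCategory, pvDefs, List.find?, hb, hu, hc]
          rw [show pvStepA (PySem.Dict.mk [("user_facing", u), ("business_facing", b), ("common_ui", c), ("other", o)]) k
                = PySem.Dict.mk [("user_facing", u), ("business_facing", b), ("common_ui", c), ("other", o ++ [k])] by
            simp [pvStepA, (List.any_eq_true.not.mp hb), (List.any_eq_true.not.mp hu), (List.any_eq_true.not.mp hc), PySem.Dict.modify, PySem.Dict.getD, PySem.Dict.get?, PySem.Dict.contains, PySem.Dict.insert]]
          rw [ih]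
          simp [hcat]

-- ===== VERDICT (by name: the statement is the Claim_ definition above) =====
theorem categorize_missing_keys_spec : Claim_equal_categorize_missing_keys := by
  intro missing_keys _
  show _ = _
  simp [categorize_missing_keys, categorize_missing_keys_alt, pvFold_items]
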